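-- pv_equiv track=rewrite | github.com/emmanuel-pogbe/key2click | Learning/tkinter/calculator.py | get_first_opp
-- ===== SOURCE A (Python) =====
-- def get_first_opp(text,index):
--     opp1 = ""
--     end_char = -1
--     for i in range(index-1,-1,-1):
--         if text[i].isnumeric() or text[i] == ".":
--             opp1 = text[i] + opp1
--             end_char = i
--         else:
--             break
--     return [opp1,end_char]
-- ===== SOURCE B (Python) =====
-- def get_first_opp(text, index):
--     start = index
--     while start > 0 and (text[start - 1].isnumeric() or text[start - 1] == "."):
--         start -= 1
--     if start == index:
--         return ["", -1]
--     return [text[start:index], start]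
-- ===== Notes on version B (the rewrite author's own statement) =====
-- stated objective: simpler
-- what changed: B tracks only the left boundary index with a while-loop and produces the result with a single slice, instead of A's for-loop that builds the string by prepending one character at a time while tracking end_char.
import Mathlib
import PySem

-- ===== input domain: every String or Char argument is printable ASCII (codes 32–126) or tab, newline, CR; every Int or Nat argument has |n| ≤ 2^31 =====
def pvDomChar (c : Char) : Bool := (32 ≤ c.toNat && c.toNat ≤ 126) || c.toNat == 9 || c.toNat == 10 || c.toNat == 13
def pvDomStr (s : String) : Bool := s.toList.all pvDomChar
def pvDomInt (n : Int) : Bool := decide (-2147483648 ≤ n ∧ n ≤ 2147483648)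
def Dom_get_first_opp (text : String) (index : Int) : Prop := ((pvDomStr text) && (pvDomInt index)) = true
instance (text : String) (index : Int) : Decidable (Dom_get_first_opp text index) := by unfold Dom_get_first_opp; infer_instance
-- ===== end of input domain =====

-- B finds the left boundary of the numeric run with a single index countdown and takes one
-- slice, instead of A's char-by-char string prepending; objective: simpler (and no repeated
-- string concatenation).

-- the shared character test: c.isnumeric() or c == "." (exact on the ASCII domain)
def pvNumChar (c : Char) : Bool := PySem.Chars.isdigit c || c == '.'

-- ===== PORT A =====
-- A's for-loop over range(index-1, -1, -1): state (opp1, end_char), break on a non-number char.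
-- text[i] → PySem.List.pyGet? (none = IndexError, excluded by Pre_; the loop then stops).
def pvALoop (cs : List Char) : List Int → List Char → Int → List Char × Int
  | [], opp1, ec => (opp1, ec)
  | i :: rest, opp1, ec =>
    match PySem.List.pyGet? cs i with
    | none => (opp1, ec)
    | some c => if pvNumChar c then pvALoop cs rest (c :: opp1) i else (opp1, ec)

def get_first_opp (text : String) (index : Int) : String × Int :=
  let r := pvALoop text.toList (PySem.List.pyRange (index - 1) (-1) (-1)) [] (-1)
  (String.mk r.1, r.2)

-- ===== PORT B =====
-- B's while-loop: decrement start while start > 0 and text[start-1] is numeric or '.'.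
-- The counter is tracked as a Nat once it is positive (the loop only runs for start > 0).
def pvBLoop (cs : List Char) : Nat → Nat
  | 0 => 0
  | s + 1 => if (cs[s]?.elim false pvNumChar) then pvBLoop cs s else s + 1

def get_first_opp_alt (text : String) (index : Int) : String × Int :=
  let cs := text.toList
  let start : Int := if index ≤ 0 then index else (pvBLoop cs index.toNat : Int)
  if start = index then ("", -1)
  else (String.mk (PySem.List.slice cs (some start) (some index)), start)

-- ===== PRECONDITION & SPEC =====
-- Python A raises IndexError iff index > len(text) (first access text[index-1]); B raises there too.
def Pre_get_first_opp (text : String) (index : Int) : Prop := index ≤ (text.toList.length : Int)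
instance (text : String) (index : Int) : Decidable (Pre_get_first_opp text index) := by unfold Pre_get_first_opp; infer_instance
def pvWitness_get_first_opp : String × Int := ("12+3.4", 6)

def Spec_get_first_opp (text : String) (index : Int) (out : String × Int) : Prop := out = get_first_opp_alt text index
instance (text : String) (index : Int) (out : String × Int) : Decidable (Spec_get_first_opp text index out) := by unfold Spec_get_first_opp; infer_instance

-- ===== CLAIM (what is proved, stated in full; the proofs are below) =====
def Claim_equal_get_first_opp : Prop := ∀ (text : String) (index : Int), Dom_get_first_opp text index → Pre_get_first_opp text index → Spec_get_first_opp text index (get_first_opp text index)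

-- ===== LEMMAS AND PROOFS =====

lemma pvBLoop_le (cs : List Char) (j : Nat) : pvBLoop cs j ≤ j := by
  induction j with
  | zero => simp [pvBLoop]
  | succ s ih =>
    unfold pvBLoop
    split
    · omega
    · omega

-- the key loop correspondence: A's fold over range(j-1,-1,-1) with accumulated state (acc, ec)
-- equals B's boundary s = pvBLoop cs j together with one drop/take slice.
lemma pvALoop_eq (cs : List Char) (j : Nat) (hj : j ≤ cs.length) (acc : List Char) (ec : Int) :
    pvALoop cs (PySem.List.pyRange ((j : Int) - 1) (-1) (-1)) acc ec =
      (if pvBLoop cs j = j then (acc, ec)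
       else ((cs.drop (pvBLoop cs j)).take (j - pvBLoop cs j) ++ acc, (pvBLoop cs j : Int))) := by
  induction j generalizing acc ec with
  | zero =>
    rw [PySem.List.pyRange_neg_one_eq_nil (by norm_num)]
    simp [pvALoop, pvBLoop]
  | succ s ih =>
    have hs : s < cs.length := by omega
    have hcast : ((s + 1 : Nat) : Int) - 1 = (s : Int) := by push_cast; ring
    rw [hcast, PySem.List.pyRange_neg_one_cons (show (-1:Int) < (s:Int) by omega)]
    have hget : PySem.List.pyGet? cs ((s : Nat) : Int) = some cs[s] := by
      rw [PySem.List.pyGet?_natCast, List.getElem?_eq_getElem hs]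
    unfold pvALoop
    rw [hget]
    simp only
    by_cases hok : pvNumChar cs[s]
    · rw [if_pos hok, ih (by omega)]
      have hb : pvBLoop cs (s + 1) = pvBLoop cs s := by
        simp [pvBLoop, List.getElem?_eq_getElem hs, hok]
      have hle : pvBLoop cs s ≤ s := pvBLoop_le cs s
      rw [hb]
      by_cases hsj : pvBLoop cs s = s
      · rw [if_pos hsj, if_neg (by omega)]
        rw [hsj]
        have hone : s + 1 - s = 1 := by omega
        rw [hone, List.take_one_drop_eq_of_lt_length hs]
        simp
      · rw [if_neg hsj, if_neg (by omega)]
        have htake : (cs.drop (pvBLoop cs s)).take (s + 1 - pvBLoop cs s) =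
            (cs.drop (pvBLoop cs s)).take (s - pvBLoop cs s) ++ [cs[s]] := by
          have h1 : s + 1 - pvBLoop cs s = (s - pvBLoop cs s) + 1 := by omega
          rw [h1, List.take_succ]
          have h2 : (cs.drop (pvBLoop cs s))[s - pvBLoop cs s]? = some cs[s] := by
            rw [List.getElem?_drop]
            rw [show pvBLoop cs s + (s - pvBLoop cs s) = s by omega,
              List.getElem?_eq_getElem hs]
          rw [h2]
          rfl
        rw [htake, List.append_assoc]
        rfl
    · rw [if_neg hok]
      have hb : pvBLoop cs (s + 1) = s + 1 := by
        simp [pvBLoop, List.getElem?_eq_getElem hs, hok]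
      rw [hb, if_pos rfl]

-- ===== VERDICT (by name: the statement is the Claim_ definition above) =====
theorem get_first_opp_spec : Claim_equal_get_first_opp := by
  intro text index _ hpre
  unfold Pre_get_first_opp at hpre
  unfold Spec_get_first_opp get_first_opp get_first_opp_alt
  have hmk : String.mk ([] : List Char) = "" := rfl
  by_cases hneg : index ≤ 0
  · rw [PySem.List.pyRange_neg_one_eq_nil (by omega)]
    simp [pvALoop, hneg, hmk]
  · have h0 : 0 ≤ index := by omega
    have hidx : index = ((index.toNat : Nat) : Int) := (Int.toNat_of_nonneg h0).symm
    have hj : index.toNat ≤ text.toList.length := by omega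
    rw [hidx]
    rw [pvALoop_eq text.toList index.toNat hj [] (-1)]
    have hpos : ¬ ((index.toNat : Nat) : Int) ≤ 0 := by omega
    simp only [Int.toNat_natCast, if_neg hpos]
    by_cases hsj : pvBLoop text.toList index.toNat = index.toNat
    · simp [hsj, hmk]
    · have hne : ((pvBLoop text.toList index.toNat : Nat) : Int) ≠ ((index.toNat : Nat) : Int) := by
        exact_mod_cast hsj
      simp only [if_neg hsj, if_neg hne, PySem.List.slice_natCast, List.append_nil]
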